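-- pv_equiv track=rewrite | github.com/bobbylinux/algorithms | dynamic_programming.py | hateville_solution
-- ===== SOURCE A (Python) =====
-- def hateville_solution(DP, D, i):
--     if i == 0:
--         return []
--     if i == 1:
--         return [0]
--     if DP[i] == DP[i-1]:
--         return hateville_solution(DP, D, i-1)
--     else:
--         result = hateville_solution(DP, D, i-2)
--         result.append(i-1)
--     return result
-- ===== SOURCE B (Python) =====
-- def hateville_solution(DP, D, i):
--     if i == 0:
--         return []
--     picked = []
--     skip = False
--     for j in range(i, 1, -1):
--         if skip:
--             skip = False
--         elif DP[j] != DP[j - 1]: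
--             picked.append(j - 1)
--             skip = True
--     if not skip:
--         picked.append(0)
--     picked.reverse()
--     return picked
-- ===== Notes on version B (the rewrite author's own statement) =====
-- stated objective: alternative
-- what changed: Replaces the top-down recursion with variable step (and list append after the recursive call) by a single forward for-loop over a fixed range(i,1,-1) that carries a skip flag instead of changing the step, plus one final reversal.
import Mathlib
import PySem

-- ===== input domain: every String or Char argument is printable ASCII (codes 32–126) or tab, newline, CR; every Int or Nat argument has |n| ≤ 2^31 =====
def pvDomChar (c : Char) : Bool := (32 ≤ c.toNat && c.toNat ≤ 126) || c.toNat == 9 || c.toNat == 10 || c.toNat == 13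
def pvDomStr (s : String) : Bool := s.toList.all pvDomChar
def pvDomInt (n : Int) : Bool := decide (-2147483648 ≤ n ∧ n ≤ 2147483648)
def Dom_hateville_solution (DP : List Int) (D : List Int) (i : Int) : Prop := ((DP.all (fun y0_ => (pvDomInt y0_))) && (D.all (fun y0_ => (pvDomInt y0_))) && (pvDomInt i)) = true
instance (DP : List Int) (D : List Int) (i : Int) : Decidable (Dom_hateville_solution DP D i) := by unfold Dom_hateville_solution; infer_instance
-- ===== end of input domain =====

-- B replaces A's variable-step recursion by a for-loop over the fixed range(i,1,-1)
-- carrying a skip flag, with one final reversal (same return value; objective: alternative).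

-- ===== PORT A =====
-- A's recursion, on the index as a Nat (the 'if i < 0' guard in the wrapper only
-- makes the Lean function total; Python A raises IndexError on every negative i).
def hatevilleRecA (DP : List Int) (D : List Int) : Nat → List Int
  | 0 => []
  | 1 => [0]
  | (n+2) =>
    match PySem.List.pyGet? DP ((n : Int) + 2), PySem.List.pyGet? DP ((n : Int) + 1) with
    | some a, some b =>
        if a = b then hatevilleRecA DP D (n+1)
        else hatevilleRecA DP D n ++ [(n : Int) + 1]
    | _, _ => []   -- IndexError in Python: outside Pre_

def hateville_solution (DP : List Int) (D : List Int) (i : Int) : List Int :=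
  if i < 0 then [] else hatevilleRecA DP D i.toNat

-- ===== PORT B =====
-- Source B's for-loop over range(i, 1, -1): state = (skip flag, picked so far);
-- j counts down by ONE each step, the flag replaces the variable step.
def hatevilleForB (DP : List Int) : Nat → Bool → List Int → Bool × List Int
  | (j+2), skip, picked =>
      if skip then hatevilleForB DP (j+1) false picked
      else if PySem.List.pyGetD DP ((j : Int) + 2) 0 ≠ PySem.List.pyGetD DP ((j : Int) + 1) 0
      then hatevilleForB DP (j+1) true (picked ++ [(j : Int) + 1])
      else hatevilleForB DP (j+1) false picked
  | _, skip, picked => (skip, picked)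

def hateville_solution_alt (DP : List Int) (_D : List Int) (i : Int) : List Int :=
  if i = 0 then []
  else
    let p := hatevilleForB DP i.toNat false []
    (if p.1 then p.2 else p.2 ++ [0]).reverse

-- ===== PRECONDITION & SPEC =====
-- Pre_ excludes exactly the inputs where Python A raises IndexError: any i ≥ 2
-- with i out of range of DP, and any negative i (the descent then runs off the
-- front of DP).  i = 0 and i = 1 never index DP and are always admitted.
def Pre_hateville_solution (DP : List Int) (D : List Int) (i : Int) : Prop :=
  i = 0 ∨ i = 1 ∨ (2 ≤ i ∧ i < DP.length)

instance (DP : List Int) (D : List Int) (i : Int) : Decidable (Pre_hateville_solution DP D i) := by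
  unfold Pre_hateville_solution; infer_instance

def pvWitness_hateville_solution : List Int × List Int × Int := ([1, 3, 3, 7, 7], [], 4)

def Spec_hateville_solution (DP : List Int) (D : List Int) (i : Int) (out : List Int) : Prop := out = hateville_solution_alt DP D i
instance (DP : List Int) (D : List Int) (i : Int) (out : List Int) : Decidable (Spec_hateville_solution DP D i out) := by unfold Spec_hateville_solution; infer_instance

-- ===== CLAIM (what is proved, stated in full; the proofs are below) =====
def Claim_equal_hateville_solution : Prop := ∀ (DP : List Int) (D : List Int) (i : Int), Dom_hateville_solution DP D i → Pre_hateville_solution DP D i → Spec_hateville_solution DP D i (hateville_solution DP D i)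

-- ===== LEMMAS AND PROOFS =====

-- In range, B's countdown with the skip flag accumulates exactly the reverse of
-- A's recursion, and the final flag tells whether the trailing 0 is present.
theorem hatevilleFor_eq (DP : List Int) (D : List Int) :
    ∀ n, n < DP.length → 1 ≤ n → ∀ acc,
      (if (hatevilleForB DP n false acc).1 then (hatevilleForB DP n false acc).2
       else (hatevilleForB DP n false acc).2 ++ [0])
        = acc ++ (hatevilleRecA DP D n).reverse := by
  intro n
  induction n using Nat.strong_induction_on with
  | _ n ih =>
    match n with
    | 0 => intro _ h; omega
    | 1 => intro _ _ acc; simp [hatevilleForB, hatevilleRecA]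
    | (m+2) =>
      intro hlt _ acc
      have h2 : PySem.List.pyGet? DP ((m : Int) + 2) = some (DP[m+2]'(by omega)) := by
        have := PySem.List.pyGet?_ofNat (xs := DP) (n := m+2) (by omega)
        simpa [Nat.cast_add] using this
      have h1 : PySem.List.pyGet? DP ((m : Int) + 1) = some (DP[m+1]'(by omega)) := by
        have := PySem.List.pyGet?_ofNat (xs := DP) (n := m+1) (by omega)
        simpa [Nat.cast_add] using this
      have g2 : PySem.List.pyGetD DP ((m : Int) + 2) 0 = DP[m+2]'(by omega) := by
        have := PySem.List.pyGetD_ofNat (xs := DP) (n := m+2) (d := (0:Int)) (by omega)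
        simpa [Nat.cast_add] using this
      have g1 : PySem.List.pyGetD DP ((m : Int) + 1) 0 = DP[m+1]'(by omega) := by
        have := PySem.List.pyGetD_ofNat (xs := DP) (n := m+1) (d := (0:Int)) (by omega)
        simpa [Nat.cast_add] using this
      by_cases heq : (DP[m+2]'(by omega)) = (DP[m+1]'(by omega))
      · have hstep : hatevilleForB DP (m+2) false acc = hatevilleForB DP (m+1) false acc := by
          simp [hatevilleForB, g2, g1, heq]
        have hr : hatevilleRecA DP D (m+2) = hatevilleRecA DP D (m+1) := by
          simp [hatevilleRecA, h2, h1, heq]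
        rw [hstep, hr]
        exact ih (m+1) (by omega) (by omega) (by omega) acc
      · have hstep : hatevilleForB DP (m+2) false acc
            = hatevilleForB DP (m+1) true (acc ++ [(m : Int) + 1]) := by
          simp [hatevilleForB, g2, g1, heq]
        have hr : hatevilleRecA DP D (m+2) = hatevilleRecA DP D m ++ [(m : Int) + 1] := by
          simp [hatevilleRecA, h2, h1, heq]
        rw [hstep, hr]
        cases m with
        | zero => simp [hatevilleForB, hatevilleRecA]
        | succ k =>
          have hskip : hatevilleForB DP (k+1+1) true (acc ++ [((k:Int)+1) + 1])
              = hatevilleForB DP (k+1) false (acc ++ [((k:Int)+1) + 1]) := by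
            simp [hatevilleForB]
          have hih := ih (k+1) (by omega) (by omega) (by omega)
              (acc ++ [((k:Int)+1) + 1])
          push_cast
          rw [hskip, hih]
          simp

-- ===== VERDICT (by name: the statement is the Claim_ definition above) =====
theorem hateville_solution_spec : Claim_equal_hateville_solution := by
  intro DP D i _ hpre
  unfold Spec_hateville_solution hateville_solution hateville_solution_alt
  rcases hpre with h0 | h1 | ⟨h2, hlt⟩
  · subst h0; simp [hatevilleRecA]
  · subst h1; simp [hatevilleRecA, hatevilleForB]
  · have hni : ¬ i < 0 := by omega
    have hne : i ≠ 0 := by omega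
    rw [if_neg hni, if_neg hne]
    have hkey := hatevilleFor_eq DP D i.toNat (by omega) (by omega) []
    simp only [List.nil_append] at hkey
    show hatevilleRecA DP D i.toNat
        = (if (hatevilleForB DP i.toNat false []).1 then (hatevilleForB DP i.toNat false []).2
           else (hatevilleForB DP i.toNat false []).2 ++ [0]).reverse
    rw [hkey, List.reverse_reverse]
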